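-- pv_equiv track=rewrite | github.com/MikWink/AoC-2023-public | day3.py | checkRightNeighbours
-- ===== SOURCE A (Python) =====
-- def checkRightNeighbours(line, index):
--     number = ""
--     while index < (len(line) - 1) and not line[index] == ".":
--         index += 1
--         if line[index].isdigit():
--             number += line[index]
--     if number:
--         return int(number)
--     else:
--         return 0
-- ===== SOURCE B (Python) =====
-- def checkRightNeighbours(line, index):
--     stop = line.find('.', index)
--     if stop == -1:
--         stop = len(line) - 1
--     digits = ''.join(c for c in line[index + 1 : stop + 1] if c.isdigit())
--     return int(digits) if digits else 0
-- ===== Notes on version B (the rewrite author's own statement) =====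
-- stated objective: faster
-- what changed: A's single fused while-loop (index arithmetic, character test and digit accumulation interleaved) is replaced by a three-step decomposition: locate the stopping '.' with str.find (falling back to the inclusive last index), slice the scanned region, and filter/convert its digits; the per-character Python-level loop disappears into C-level find/slice, a constant-factor win.
-- outside the precondition, e.g. on checkRightNeighbours('12', -2): A returns 212, B returns 2
import Mathlib
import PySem

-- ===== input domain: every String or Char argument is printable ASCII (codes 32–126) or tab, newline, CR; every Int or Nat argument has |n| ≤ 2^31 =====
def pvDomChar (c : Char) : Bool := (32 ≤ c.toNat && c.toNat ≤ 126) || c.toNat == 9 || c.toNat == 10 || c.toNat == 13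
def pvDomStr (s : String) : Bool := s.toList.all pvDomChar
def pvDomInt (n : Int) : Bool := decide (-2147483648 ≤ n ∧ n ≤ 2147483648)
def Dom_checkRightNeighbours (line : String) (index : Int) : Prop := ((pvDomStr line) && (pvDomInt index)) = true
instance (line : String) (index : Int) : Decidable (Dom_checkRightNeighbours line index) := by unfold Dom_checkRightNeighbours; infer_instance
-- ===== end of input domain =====

-- B replaces A's fused scan loop by find-the-delimiter + slice + filter (idiomatic decomposition); equivalence is claimed for 0 ≤ index.

-- ===== PORT A =====
-- while loop of A: 'index' moves right, digits are appended to 'number'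
def crnLoop (cs : List Char) (index : Int) (number : List Char) : List Char :=
  if _h : index < (cs.length : Int) - 1 ∧ ¬ (PySem.List.pyGetD cs index '.' = '.') then
    let c := PySem.List.pyGetD cs (index + 1) '.'
    crnLoop cs (index + 1) (if PySem.Chars.isdigit c then number ++ [c] else number)
  else number
termination_by ((cs.length : Int) - 1 - index).toNat
decreasing_by omega

def checkRightNeighbours (line : String) (index : Int) : Int :=
  let number := crnLoop line.toList index []
  if number ≠ [] then (PySem.Int.ofChars? number).getD 0 else 0

-- ===== PORT B =====
def checkRightNeighbours_alt (line : String) (index : Int) : Int :=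
  let stop0 := PySem.Str.findFrom line "." index
  let stop := if stop0 = -1 then PySem.Str.len line - 1 else stop0
  let digits := List.filter PySem.Chars.isdigit
      (PySem.List.slice line.toList (some (index + 1)) (some (stop + 1)))
  if digits ≠ [] then (PySem.Int.ofChars? digits).getD 0 else 0

-- ===== PRECONDITION & SPEC =====
-- Pre_ excludes negative indices: there A mixes the raw (negative) loop bound with Python's
-- wraparound character access, giving an accidental value (and an IndexError for index < -len(line));
-- B's find/slice clamp instead — a corner no caller of this AoC grid scan would specify either way.
def Pre_checkRightNeighbours (line : String) (index : Int) : Prop := 0 ≤ index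
instance (line : String) (index : Int) : Decidable (Pre_checkRightNeighbours line index) := by unfold Pre_checkRightNeighbours; infer_instance

def pvWitness_checkRightNeighbours : String × Int := ("4.17*", 1)

def Spec_checkRightNeighbours (line : String) (index : Int) (out : Int) : Prop := out = checkRightNeighbours_alt line index
instance (line : String) (index : Int) (out : Int) : Decidable (Spec_checkRightNeighbours line index out) := by unfold Spec_checkRightNeighbours; infer_instance

-- ===== CLAIM (what is proved, stated in full; the proofs are below) =====
def Claim_equal_checkRightNeighbours : Prop := ∀ (line : String) (index : Int), Dom_checkRightNeighbours line index → Pre_checkRightNeighbours line index → Spec_checkRightNeighbours line index (checkRightNeighbours line index)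

-- ===== LEMMAS AND PROOFS =====

-- prefix of t up to and including the first '.', all of t if there is none
def pvUpTo : List Char → List Char
  | [] => []
  | c :: t => if c = '.' then ['.'] else c :: pvUpTo t

-- the digits A's loop collects / B's slice keeps, as a function of the suffix cs.drop k
def pvSeg : List Char → List Char
  | [] => []
  | a :: rest => if a = '.' then [] else (pvUpTo rest).filter PySem.Chars.isdigit

theorem crnLoop_eq (cs : List Char) : ∀ (n k : Nat) (acc : List Char), cs.length ≤ k + n →
    crnLoop cs (k : Int) acc = acc ++ pvSeg (cs.drop k) := by
  intro n
  induction n with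
  | zero =>
    intro k acc hk
    rw [crnLoop]
    rw [List.drop_eq_nil_of_le (by omega)]
    simp [pvSeg]
    omega
  | succ n ih =>
    intro k acc hk
    rw [crnLoop]
    rcases hdrop : cs.drop k with _ | ⟨a, rest⟩
    · have : cs.length ≤ k := by
        by_contra h
        have := List.drop_eq_nil_iff.mp hdrop
        omega
      simp [pvSeg]
      omega
    · have hlen : cs.length = k + rest.length + 1 := by
        have := congrArg List.length hdrop
        simp at this
        omega
      have hget : PySem.List.pyGetD cs (k : Int) '.' = a := by
        rw [PySem.List.pyGetD_natCast]
        have : cs[k]? = some a := by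
          rw [← List.head?_drop, hdrop]; rfl
        simp [List.getD, this]
      by_cases ha : a = '.'
      · rw [dif_neg (by simp [hget, ha])]
        simp [pvSeg, ha]
      · rcases hrest : rest with _ | ⟨b, r⟩
        · rw [dif_neg (by rw [hget]; simp [hrest] at hlen; omega)]
          simp [pvSeg, ha, pvUpTo]
        · have hguard : (k : Int) < (cs.length : Int) - 1 ∧ ¬ (PySem.List.pyGetD cs (k : Int) '.' = '.') := by
            constructor
            · simp [hrest] at hlen; omega
            · simp [hget, ha]
          rw [dif_pos hguard]
          have hget1 : PySem.List.pyGetD cs ((k : Int) + 1) '.' = b := by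
            have : ((k : Int) + 1) = ((k + 1 : Nat) : Int) := by push_cast; ring
            rw [this, PySem.List.pyGetD_natCast]
            have hdrop1 : cs.drop (k + 1) = b :: r := by
              rw [← List.tail_drop, hdrop, hrest]; rfl
            have : cs[k+1]? = some b := by
              rw [← List.head?_drop, hdrop1]; rfl
            simp [List.getD, this]
          have hcast : ((k : Int) + 1) = ((k + 1 : Nat) : Int) := by push_cast; ring
          rw [hget1, hcast, ih (k + 1) _ (by omega)]
          rw [← List.tail_drop, hdrop, hrest]
          show _ = acc ++ pvSeg (a :: b :: r)
      -- remaining: accumulator bookkeeping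
          simp only [pvSeg, if_neg ha, pvUpTo]
          by_cases hb : b = '.'
          · have hnd : PySem.Chars.isdigit '.' = false := by decide
            simp [hb, hnd]
          · simp only [List.filter_cons, if_neg hb]
            by_cases hdig : PySem.Chars.isdigit b
            · simp [hdig, hb]
            · simp [hdig, hb]

theorem find_go_nil (sub : List Char) (m : Nat) :
    PySem.Chars.find.go sub [] m = if sub.isEmpty = true then (m : Int) else -1 := by
  cases h : sub.isEmpty <;> simp [PySem.Chars.find.go, h]

theorem find_go_cons (sub : List Char) (hd : Char) (t : List Char) (m : Nat) :
    PySem.Chars.find.go sub (hd :: t) m =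
      if sub.isPrefixOf (hd :: t) = true then (m : Int) else PySem.Chars.find.go sub t (m + 1) := by
  cases h : sub.isPrefixOf (hd :: t) <;> simp [PySem.Chars.find.go, h]

theorem find_go_succ (sub t : List Char) : ∀ (k : Nat),
    PySem.Chars.find.go sub t ((k : Nat) + 1) =
      (if PySem.Chars.find.go sub t k = -1 then -1 else PySem.Chars.find.go sub t k + 1) := by
  induction t with
  | nil =>
    intro k
    rw [find_go_nil, find_go_nil]
    by_cases h : sub.isEmpty = true
    · rw [if_pos h, if_pos h, if_neg (by omega)]
      push_cast; ring
    · simp [h]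
  | cons hd t ih =>
    intro k
    rw [find_go_cons, find_go_cons]
    by_cases hp : sub.isPrefixOf (hd :: t) = true
    · rw [if_pos hp, if_pos hp, if_neg (by omega)]
      push_cast; ring
    · rw [if_neg hp, if_neg hp]
      exact ih (k + 1)

theorem find_dot_cons (a : Char) (t : List Char) :
    PySem.Chars.find (a :: t) ['.'] =
      if a = '.' then 0 else (if PySem.Chars.find t ['.'] = -1 then -1 else PySem.Chars.find t ['.'] + 1) := by
  have h0 : PySem.Chars.find (a :: t) ['.'] = PySem.Chars.find.go ['.'] (a :: t) 0 := rfl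
  rw [h0, find_go_cons]
  have hpre : ((['.'] : List Char).isPrefixOf (a :: t)) = ('.' == a) := by
    simp [List.isPrefixOf]
  rw [hpre]
  by_cases ha : a = '.'
  · simp [ha]
  · have hba : ('.' == a) = false := beq_eq_false_iff_ne.mpr (fun h => ha h.symm)
    rw [hba, if_neg (by simp), if_neg ha]
    have := find_go_succ ['.'] t 0
    simpa [PySem.Chars.find] using this

theorem find_dot_nil : PySem.Chars.find [] ['.'] = -1 := by
  have h0 : PySem.Chars.find [] ['.'] = PySem.Chars.find.go ['.'] [] 0 := rfl
  rw [h0, find_go_nil]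
  simp

theorem pvUpTo_of_no_dot (t : List Char) (h : PySem.Chars.find t ['.'] = -1) : pvUpTo t = t := by
  induction t with
  | nil => rfl
  | cons a t ih =>
    rw [find_dot_cons] at h
    by_cases ha : a = '.'
    · simp [ha] at h
    · rw [if_neg ha] at h
      split at h
      · simp [pvUpTo, ha, ih (by assumption)]
      · have := PySem.Chars.neg_one_le_find t ['.']
        omega

theorem pvUpTo_of_dot (t : List Char) (h : 0 ≤ PySem.Chars.find t ['.']) :
    pvUpTo t = t.take ((PySem.Chars.find t ['.']).toNat + 1) := by
  induction t with
  | nil => rw [find_dot_nil] at h; omega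
  | cons a t ih =>
    rw [find_dot_cons] at h ⊢
    by_cases ha : a = '.'
    · simp [ha, pvUpTo]
    · rw [if_neg ha] at h ⊢
      split at h
      · omega
      · rename_i hne
        have hge : 0 ≤ PySem.Chars.find t ['.'] := by
          have := PySem.Chars.neg_one_le_find t ['.']
          omega
        rw [if_neg hne]
        have : (PySem.Chars.find t ['.'] + 1).toNat + 1 = ((PySem.Chars.find t ['.']).toNat + 1) + 1 := by omega
        simp [pvUpTo, ha, this, ih hge]

theorem findFrom_past (cs : List Char) (k : Nat) (h : cs.length < k) :
    PySem.Chars.findFrom cs ['.'] (k : Int) none = -1 := by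
  simp [PySem.Chars.findFrom]
  omega

theorem slice_seg (cs : List Char) (k : Nat) :
    List.filter PySem.Chars.isdigit
        (PySem.List.slice cs (some ((k : Int) + 1))
          (some ((if PySem.Chars.findFrom cs ['.'] (k : Int) none = -1
                  then (cs.length : Int) - 1
                  else PySem.Chars.findFrom cs ['.'] (k : Int) none) + 1))) =
      pvSeg (cs.drop k) := by
  by_cases hk : cs.length ≤ k
  · -- suffix empty: findFrom is -1, the slice is empty
    have hff : PySem.Chars.findFrom cs ['.'] (k : Int) none = -1 := by
      rcases Nat.lt_or_ge cs.length k with h | h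
      · exact findFrom_past cs k h
      · have hk' : k = cs.length := by omega
        rw [hk', PySem.Chars.findFrom_natCast cs ['.'] cs.length le_rfl]
        simp [find_dot_nil]
      
    rw [hff, if_pos rfl]
    have : ((cs.length : Int) - 1 + 1) = ((cs.length : Nat) : Int) := by ring
    rw [this]
    have : ((k : Int) + 1) = ((k + 1 : Nat) : Int) := by push_cast; ring
    rw [this, PySem.List.slice_natCast]
    rw [List.drop_eq_nil_of_le (by omega), List.drop_eq_nil_of_le (by omega)]
    simp [pvSeg]
  · rw [not_le] at hk
    rw [PySem.Chars.findFrom_natCast cs ['.'] k (by omega)]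
    rcases hdrop : cs.drop k with _ | ⟨a, rest⟩
    · have := List.drop_eq_nil_iff.mp hdrop; omega
    · have hlen : cs.length = k + rest.length + 1 := by
        have := congrArg List.length hdrop
        simp at this
        omega
      have hdrop1 : cs.drop (k + 1) = rest := by
        rw [← List.tail_drop, hdrop]; rfl
      rw [find_dot_cons]
      by_cases ha : a = '.'
      · -- stops at once: slice [k+1, k+1) is empty
        rw [if_pos ha]
        have e1 : (if (0 : Int) = -1 then (-1 : Int) else (k : Int) + 0) = (k : Int) := by norm_num
        rw [e1]
        have e2 : ¬((k : Int) = -1) := by omega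
        rw [if_neg e2]
        have h2 : ((k : Int) + 1) = ((k + 1 : Nat) : Int) := by push_cast; ring
        rw [h2, PySem.List.slice_natCast]
        simp [pvSeg, ha]
      · rw [if_neg ha]
        by_cases hr : PySem.Chars.find rest ['.'] = -1
        · -- no '.' to the right: slice runs to the end of the line
          have e1 : (if PySem.Chars.find rest ['.'] = -1 then (-1 : Int) else PySem.Chars.find rest ['.'] + 1) = -1 := by
            rw [if_pos hr]
          rw [e1, if_pos rfl, if_pos rfl]
          have h1 : ((cs.length : Int) - 1 + 1) = ((cs.length : Nat) : Int) := by ring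
          have h2 : ((k : Int) + 1) = ((k + 1 : Nat) : Int) := by push_cast; ring
          rw [h1, h2, PySem.List.slice_natCast]
          rw [List.take_of_length_le (by simp [hdrop1]; omega)] -- drop (k+1) fully taken
          rw [hdrop1]
          simp [pvSeg, ha, pvUpTo_of_no_dot rest hr]
        · -- '.' found at k + 1 + find rest
          have hge : 0 ≤ PySem.Chars.find rest ['.'] := by
            have := PySem.Chars.neg_one_le_find rest ['.']
            omega
          rw [if_neg hr]
          have e1 : ¬(PySem.Chars.find rest ['.'] + 1 = -1) := by omega
          rw [if_neg e1]
          have e2 : ¬((k : Int) + (PySem.Chars.find rest ['.'] + 1) = -1) := by omega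
          rw [if_neg e2]
          set f := PySem.Chars.find rest ['.'] with hf
          have h2 : ((k : Int) + 1) = ((k + 1 : Nat) : Int) := by push_cast; ring
          have h1 : ((k : Int) + (f + 1) + 1) = (((k + 1) + (f.toNat + 1) : Nat) : Int) := by
            push_cast; omega
          rw [h1, h2, PySem.List.slice_natCast]
          have : (k + 1) + (f.toNat + 1) - (k + 1) = f.toNat + 1 := by omega
          rw [this, hdrop1]
          simp [pvSeg, ha, pvUpTo_of_dot rest hge, hf]

-- ===== VERDICT (by name: the statement is the Claim_ definition above) =====
theorem checkRightNeighbours_spec : Claim_equal_checkRightNeighbours := by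
  intro line index _hdom hpre
  unfold Spec_checkRightNeighbours checkRightNeighbours checkRightNeighbours_alt
  have hk : index = ((index.toNat : Nat) : Int) := (Int.toNat_of_nonneg hpre).symm
  rw [hk]
  rw [crnLoop_eq line.toList line.toList.length index.toNat [] (by omega)]
  rw [PySem.Str.findFrom_eq]
  have hdot : ("." : String).toList = ['.'] := by decide
  rw [hdot, PySem.Str.len]
  simp only [slice_seg line.toList index.toNat]
  simp
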